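-- pv_equiv track=rewrite | github.com/ConnorSiXiong/Top_2000 | Nine/Ladder1/Week10/ZeroPermutation.py | stringCount2
-- ===== SOURCE A (Python) =====
-- def stringCount2(s):
--     # 在尾巴上加一个"1"，保证不会算漏掉最后一个 001000
--     # 这种写法貌似比while循环两个值好
--     s += "1"
--
--     res = 0
--     j = 1
--     for i in range(len(s) - 1):
--         if s[i] == "1":
--             continue
--         j = max(j, i + 1)
--         while j < len(s) and s[j] == "0":
--             j += 1
--         # 上面的那个while直接让j走到头了
--         # 所以不用进行其他的判断了，对比前面的方法
--         res += (j - i)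
--     return res
-- ===== SOURCE B (Python) =====
-- def stringCount2(s):
--     # One left-to-right pass: `state` counts start positions whose span of
--     # non-'1' start + all-'0' continuation reaches the current char.
--     res = 0
--     state = 0
--     for c in s:
--         state = (state if c == "0" else 0) + (1 if c != "1" else 0)
--         res += state
--     return res
-- ===== Notes on version B (the rewrite author's own statement) =====
-- stated objective: simpler
-- what changed: Replaces the two-pointer scan (an index j chased forward over zero runs, adding j-i per non-'1' start, with an appended sentinel '1') by a single left-to-right pass maintaining a running accumulator of live start positions, added to the result at each character; no lookahead, no sentinel, no indexing.
import Mathlib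
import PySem

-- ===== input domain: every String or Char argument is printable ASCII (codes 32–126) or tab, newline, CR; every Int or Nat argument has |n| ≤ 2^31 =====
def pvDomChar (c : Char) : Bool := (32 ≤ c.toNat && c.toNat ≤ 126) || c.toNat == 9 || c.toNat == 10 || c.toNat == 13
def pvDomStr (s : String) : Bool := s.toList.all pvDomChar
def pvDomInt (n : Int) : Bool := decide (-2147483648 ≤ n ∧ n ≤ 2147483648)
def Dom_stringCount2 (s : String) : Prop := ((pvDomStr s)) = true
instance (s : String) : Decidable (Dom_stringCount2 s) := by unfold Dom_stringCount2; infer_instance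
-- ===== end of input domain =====

-- B replaces A's two-pointer scan by a single-pass running accumulator of live start
-- positions (objective: simpler); same O(n) cost, equal return value on every input.

-- ===== PORT A =====
-- inner `while j < len(s) and s[j] == "0": j += 1`
def scAdv (L : List Char) (j : Nat) : Nat :=
  if h : j < L.length ∧ L.getD j ' ' = '0' then scAdv L (j + 1) else j
termination_by L.length - j
decreasing_by omega

-- body of `for i in range(len(s) - 1)` over state (res, j)
def scStep (L : List Char) (acc : Int × Nat) (i : Nat) : Int × Nat :=
  if L.getD i ' ' = '1' then acc
  else
    let j := scAdv L (max acc.2 (i + 1))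
    (acc.1 + ((j : Int) - (i : Int)), j)

def stringCount2 (s : String) : Int :=
  -- s += "1": the loop runs over s.toList ++ ['1']
  ((List.range ((s.toList ++ ['1']).length - 1)).foldl (scStep (s.toList ++ ['1'])) ((0 : Int), (1 : Nat))).1

-- ===== PORT B =====
def altStep (acc : Int × Int) (c : Char) : Int × Int :=
  let st := (if c = '0' then acc.2 else 0) + (if c ≠ '1' then 1 else 0)
  (acc.1 + st, st)

def stringCount2_alt (s : String) : Int :=
  (s.toList.foldl altStep ((0 : Int), (0 : Int))).1

-- ===== PRECONDITION & SPEC =====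
def Spec_stringCount2 (s : String) (out : Int) : Prop := out = stringCount2_alt s
instance (s : String) (out : Int) : Decidable (Spec_stringCount2 s out) := by unfold Spec_stringCount2; infer_instance

-- ===== CLAIM (what is proved, stated in full; the proofs are below) =====
def Claim_equal_stringCount2 : Prop := ∀ (s : String), Dom_stringCount2 s → Spec_stringCount2 s (stringCount2 s)

-- ===== LEMMAS AND PROOFS =====

-- number of leading '0' characters
def zc : List Char → Nat
  | [] => 0
  | c :: M => if c = '0' then zc M + 1 else 0

-- common specification: Σ over indices i with a nonempty tail and L[i] ≠ '1' of (1 + zc (tail after i))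
def Sspec : List Char → Int
  | [] => 0
  | c :: M => (if M = [] then 0 else if c = '1' then 0 else 1 + (zc M : Int)) + Sspec M

lemma zc_le (M : List Char) : zc M ≤ M.length := by
  induction M with
  | nil => simp [zc]
  | cons c M ih => simp only [zc]; split <;> simp <;> omega

lemma zc_zeros (M : List Char) (m : Nat) (h : m < zc M) : M.getD m ' ' = '0' := by
  induction M generalizing m with
  | nil => simp [zc] at h
  | cons c M ih =>
    simp only [zc] at h
    by_cases hc : c = '0'
    · simp [hc] at h
      cases m with
      | zero => simp [hc]
      | succ m => simpa using ih m (by omega)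
    · simp [hc] at h

lemma zc_stop (M : List Char) (h : zc M < M.length) : M.getD (zc M) ' ' ≠ '0' := by
  induction M with
  | nil => simp at h
  | cons c M ih =>
    by_cases hc : c = '0'
    · simp only [zc, hc, if_pos rfl] at h ⊢
      simpa using ih (by simpa using h)
    · simp [zc, hc]

lemma zc_eq_of (M : List Char) (d : Nat) (hd : d < M.length)
    (hz : ∀ m, m < d → M.getD m ' ' = '0') (hs : M.getD d ' ' ≠ '0') : zc M = d := by
  induction M generalizing d with
  | nil => simp at hd
  | cons c M ih =>
    cases d with
    | zero => simp at hs; simp [zc, hs]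
    | succ d =>
      have hc : c = '0' := by simpa using hz 0 (by omega)
      have := ih d (by simpa using hd) (fun m hm => by simpa using hz (m+1) (by omega))
        (by simpa using hs)
      simp [zc, hc, this]

lemma zc_append_one (L : List Char) : zc (L ++ ['1']) = zc L := by
  induction L with
  | nil => simp [zc]
  | cons c L ih => simp [zc, ih]

lemma getD_drop (L : List Char) (k m : Nat) : (L.drop k).getD m ' ' = L.getD (k + m) ' ' := by
  simp [List.getD_eq_getElem?_getD, List.getElem?_drop]

lemma scAdv_eq (L : List Char) (j : Nat) : scAdv L j = j + zc (L.drop j) := by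
  rw [scAdv]
  split
  · rename_i h
    have hj : j < L.length := h.1
    have hdrop : L.drop j = L.getD j ' ' :: L.drop (j + 1) := by
      rw [List.getD_eq_getElem _ _ hj, List.drop_eq_getElem_cons hj]
    rw [scAdv_eq L (j + 1), hdrop]
    simp only [zc, if_pos h.2]; omega
  · rename_i h
    rcases Nat.lt_or_ge j L.length with hj | hj
    · have hdrop : L.drop j = L.getD j ' ' :: L.drop (j + 1) := by
        rw [List.getD_eq_getElem _ _ hj, List.drop_eq_getElem_cons hj]
      have hc : ¬ L.getD j ' ' = '0' := by tauto
      rw [hdrop]; simp only [zc, if_neg hc]; omega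
    · rw [List.drop_eq_nil_of_le hj]; simp [zc]
termination_by L.length - j
decreasing_by omega

lemma Sspec_short (M : List Char) (h : M.length ≤ 1) : Sspec M = 0 := by
  match M with
  | [] => simp [Sspec]
  | [c] => simp [Sspec]
  | a :: b :: M => simp at h

-- invariant of A's loop entering iteration t with pointer j
def scInv (L : List Char) (t j : Nat) : Prop :=
  1 ≤ j ∧ j ≤ L.length ∧ (∀ m, t + 1 ≤ m → m < j → L.getD m ' ' = '0') ∧
    (j ≤ t + 1 ∨ (j < L.length ∧ L.getD j ' ' ≠ '0'))

lemma loopA (L : List Char) (hL : L.getD (L.length - 1) ' ' = '1') :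
    ∀ (k t : Nat) (res : Int) (j : Nat), t + k + 1 = L.length → scInv L t j →
      ((List.range' t k).foldl (scStep L) (res, j)).1 = res + Sspec (L.drop t) := by
  intro k
  induction k with
  | zero =>
    intro t res j ht _
    have : (L.drop t).length ≤ 1 := by simp; omega
    simp [Sspec_short _ this]
  | succ k ih =>
    intro t res j ht hinv
    have htlen : t < L.length := by omega
    have hdrop : L.drop t = L.getD t ' ' :: L.drop (t + 1) := by
      rw [List.getD_eq_getElem _ _ htlen, List.drop_eq_getElem_cons htlen]
    have htail : L.drop (t + 1) ≠ [] := by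
      have : (L.drop (t + 1)).length = L.length - (t + 1) := by simp
      intro hnil; rw [hnil] at this; simp at this; omega
    rw [List.range'_succ, List.foldl_cons]
    by_cases hc : L.getD t ' ' = '1'
    · have hstep : scStep L (res, j) t = (res, j) := by unfold scStep; rw [if_pos hc]
      rw [hstep, ih (t + 1) res j (by omega)
        ⟨hinv.1, hinv.2.1, fun m hm hm' => hinv.2.2.1 m (by omega) hm',
         by rcases hinv.2.2.2 with h | h; exacts [Or.inl (by omega), Or.inr h]⟩]
      rw [hdrop]; simp only [Sspec, if_neg htail, if_pos hc]; ring
    · -- contributing index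
      set z := zc (L.drop (t + 1)) with hz
      have hzlen : z ≤ L.length - (t + 1) := by
        have := zc_le (L.drop (t + 1)); simpa using this
      -- the new pointer equals t + 1 + z
      have hj' : scAdv L (max j (t + 1)) = t + 1 + z := by
        rcases Nat.le_total j (t + 1) with hle | hle
        · rw [Nat.max_eq_right hle, scAdv_eq]
        · rw [Nat.max_eq_left hle]
          rcases hinv.2.2.2 with h | h
          · rw [show j = t + 1 from le_antisymm h hle, scAdv_eq]
          · -- j > t+1 impossible unless L[j] ≠ '0'; then j is the stop point
            rcases Nat.eq_or_lt_of_le hle with heq | hlt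
            · rw [← heq, scAdv_eq]
            · have hd : j - (t + 1) < (L.drop (t + 1)).length := by simp; omega
              have hzeq : z = j - (t + 1) := by
                rw [hz]
                refine zc_eq_of _ _ hd (fun m hm => ?_) ?_
                · rw [getD_drop]; exact hinv.2.2.1 (t + 1 + m) (by omega) (by omega)
                · rw [getD_drop]
                  have : t + 1 + (j - (t + 1)) = j := by omega
                  rw [this]; exact h.2
              have hstop : zc (L.drop j) = 0 := by
                have hdj : L.drop j = L.getD j ' ' :: L.drop (j + 1) := by
                  rw [List.getD_eq_getElem _ _ h.1, List.drop_eq_getElem_cons h.1]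
                rw [hdj]; simp only [zc, if_neg h.2]
              rw [scAdv_eq, hstop]; omega
      -- z stops strictly before the final '1'
      have hzn : t + 1 + z < L.length := by
        rcases Nat.eq_or_lt_of_le (by omega : t + 1 + z ≤ L.length) with heq | hlt
        · exfalso
          have hm : L.length - 1 - (t + 1) < z := by omega
          have := zc_zeros (L.drop (t + 1)) (L.length - 1 - (t + 1)) (by omega)
          rw [getD_drop] at this
          have harg : t + 1 + (L.length - 1 - (t + 1)) = L.length - 1 := by omega
          rw [harg, hL] at this
          exact absurd this (by decide)
        · exact hlt
      have hstop' : L.getD (t + 1 + z) ' ' ≠ '0' := by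
        have : z < (L.drop (t + 1)).length := by simp; omega
        have := zc_stop (L.drop (t + 1)) this
        rwa [getD_drop] at this
      have hstep : scStep L (res, j) t =
          (res + (((t + 1 + z : Nat) : Int) - (t : Int)), t + 1 + z) := by
        unfold scStep; rw [if_neg hc, hj']
      have hinv' : scInv L (t + 1) (t + 1 + z) := by
        refine ⟨by omega, by omega, fun m hm hm' => ?_, ?_⟩
        · have := zc_zeros (L.drop (t + 1)) (m - (t + 1)) (by omega)
          rw [getD_drop] at this
          have harg : t + 1 + (m - (t + 1)) = m := by omega
          rwa [harg] at this
        · rcases Nat.eq_zero_or_pos z with hz0 | hz0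
          · left; omega
          · right; exact ⟨hzn, hstop'⟩
      rw [hstep, ih (t + 1) _ _ (by omega) hinv']
      rw [hdrop]; simp only [Sspec, if_neg htail, if_neg hc]
      push_cast; ring

lemma foldB (L : List Char) : ∀ (res st : Int),
    (L.foldl altStep (res, st)).1 = res + st * (zc L : Int) + Sspec (L ++ ['1']) := by
  induction L with
  | nil => intro res st; simp [zc, Sspec]
  | cons c L ih =>
    intro res st
    rw [List.foldl_cons]
    have hstep : altStep (res, st) c =
        (res + ((if c = '0' then st else 0) + (if c ≠ '1' then 1 else 0)),
         (if c = '0' then st else 0) + (if c ≠ '1' then 1 else 0)) := rfl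
    rw [hstep, ih]
    have htail : L ++ ['1'] ≠ [] := by simp
    simp only [List.cons_append, Sspec, if_neg htail, zc_append_one]
    by_cases h0 : c = '0'
    · have h1 : c ≠ '1' := by rw [h0]; decide
      simp [zc, h0, h1]; push_cast; ring
    · by_cases h1 : c = '1'
      · simp [zc, h0, h1]
      · simp [zc, h0, h1]; push_cast; ring

-- ===== VERDICT (by name: the statement is the Claim_ definition above) =====
theorem stringCount2_spec : Claim_equal_stringCount2 := by
  intro s _
  unfold Spec_stringCount2 stringCount2 stringCount2_alt
  have hlen : (s.toList ++ ['1']).length = s.toList.length + 1 := by simp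
  have hL : (s.toList ++ ['1']).getD ((s.toList ++ ['1']).length - 1) ' ' = '1' := by
    rw [hlen]
    simp [List.getD_eq_getElem?_getD, List.getElem?_concat_length]
  have hinv : scInv (s.toList ++ ['1']) 0 1 :=
    ⟨le_refl 1, by simp, fun m hm hm' => by omega, Or.inl (by omega)⟩
  have := loopA (s.toList ++ ['1']) hL (s.toList.length) 0 0 1 (by omega) hinv
  rw [List.range_eq_range', hlen]
  simp only [Nat.add_sub_cancel]
  rw [this, foldB s.toList 0 0]
  simp
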